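-- pv_equiv track=rewrite | github.com/Archiehehe/ev-ebitda | main.py | guess_broad_sector
-- ===== SOURCE A (Python) =====
-- def guess_broad_sector(industry_label: str):
--     """Return a list of broad sectors to prefilter on, inferred from Damodaran label."""
--     t = " " + industry_label.lower() + " "
--     def has(*ws): return any((" "+w.lower()+" ") in t for w in ws)
--     if has("telecom"):                 return ["communication services"]
--     if has("advertis", "media", "broadcast", "publishing"): return ["communication services"]
--     if has("software","semiconductor","computer","internet","communication equipment","peripherals"):
--         return ["information technology"]
--     if has("pharma","drug","biotech","medical","health"):   return ["health care"]
--     if has("retail","hotel","leisure","auto","restaurant","entertainment","homebuilding","apparel","recreation","distributor"):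
--         return ["consumer discretionary"]
--     if has("beverage","food","grocery","household","tobacco","staple"):
--         return ["consumer staples"]
--     if has("bank","insurance","capital markets","broker"):   return ["financials"]
--     if has("reit","real estate"):                            return ["real estate"]
--     if has("oil","gas","energy","coal"):                     return ["energy"]
--     if has("chem","steel","metal","mining","paper","packag","building material","construction materials"):
--         return ["materials"]
--     if has("aerospace","defense","industrial","transport","airline","railroad","trucking","marine","ship"):
--         return ["industrials"]
--     if has("utility","electric","water"):                    return ["utilities"]
--     return None  # no prefilter
-- ===== SOURCE B (Python) =====
-- # Tokenize the label once and classify via hash lookups on tokens/adjacent token pairs,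
-- # instead of testing each keyword as a padded substring; priority = rule position.
-- _RULES = [
--     (("telecom",), "communication services"),
--     (("advertis",), "communication services"), (("media",), "communication services"),
--     (("broadcast",), "communication services"), (("publishing",), "communication services"),
--     (("software",), "information technology"), (("semiconductor",), "information technology"),
--     (("computer",), "information technology"), (("internet",), "information technology"),
--     (("communication", "equipment"), "information technology"), (("peripherals",), "information technology"),
--     (("pharma",), "health care"), (("drug",), "health care"), (("biotech",), "health care"),
--     (("medical",), "health care"), (("health",), "health care"),
--     (("retail",), "consumer discretionary"), (("hotel",), "consumer discretionary"),
--     (("leisure",), "consumer discretionary"), (("auto",), "consumer discretionary"),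
--     (("restaurant",), "consumer discretionary"), (("entertainment",), "consumer discretionary"),
--     (("homebuilding",), "consumer discretionary"), (("apparel",), "consumer discretionary"),
--     (("recreation",), "consumer discretionary"), (("distributor",), "consumer discretionary"),
--     (("beverage",), "consumer staples"), (("food",), "consumer staples"), (("grocery",), "consumer staples"),
--     (("household",), "consumer staples"), (("tobacco",), "consumer staples"), (("staple",), "consumer staples"),
--     (("bank",), "financials"), (("insurance",), "financials"),
--     (("capital", "markets"), "financials"), (("broker",), "financials"),
--     (("reit",), "real estate"), (("real", "estate"), "real estate"),
--     (("oil",), "energy"), (("gas",), "energy"), (("energy",), "energy"), (("coal",), "energy"),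
--     (("chem",), "materials"), (("steel",), "materials"), (("metal",), "materials"),
--     (("mining",), "materials"), (("paper",), "materials"), (("packag",), "materials"),
--     (("building", "material"), "materials"), (("construction", "materials"), "materials"),
--     (("aerospace",), "industrials"), (("defense",), "industrials"), (("industrial",), "industrials"),
--     (("transport",), "industrials"), (("airline",), "industrials"), (("railroad",), "industrials"),
--     (("trucking",), "industrials"), (("marine",), "industrials"), (("ship",), "industrials"),
--     (("utility",), "utilities"), (("electric",), "utilities"), (("water",), "utilities"),
-- ]
-- _WORD1 = {}
-- _WORD2 = {}
-- for _i, (_toks, _sec) in enumerate(_RULES):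
--     if len(_toks) == 1:
--         _WORD1[_toks[0]] = (_i, _sec)
--     elif len(_toks) == 2:
--         _WORD2[(_toks[0], _toks[1])] = (_i, _sec)
--
--
-- def guess_broad_sector(industry_label: str):
--     """Return a list of broad sectors to prefilter on, inferred from Damodaran label."""
--     toks = industry_label.lower().split(' ')
--     best = None
--     for tok in toks:
--         hit = _WORD1.get(tok)
--         if hit is not None and (best is None or hit[0] < best[0]):
--             best = hit
--     for pair in zip(toks, toks[1:]):
--         hit = _WORD2.get(pair)
--         if hit is not None and (best is None or hit[0] < best[0]):
--             best = hit
--     return None if best is None else [best[1]]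
-- ===== Notes on version B (the rewrite author's own statement) =====
-- stated objective: faster
-- what changed: B splits the lowercased label into tokens once and classifies via dict lookups on single tokens and adjacent token pairs, keeping the hit of minimal rule index, instead of A's 12-branch if-chain testing every keyword as a space-padded substring of the label.
import Mathlib
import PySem

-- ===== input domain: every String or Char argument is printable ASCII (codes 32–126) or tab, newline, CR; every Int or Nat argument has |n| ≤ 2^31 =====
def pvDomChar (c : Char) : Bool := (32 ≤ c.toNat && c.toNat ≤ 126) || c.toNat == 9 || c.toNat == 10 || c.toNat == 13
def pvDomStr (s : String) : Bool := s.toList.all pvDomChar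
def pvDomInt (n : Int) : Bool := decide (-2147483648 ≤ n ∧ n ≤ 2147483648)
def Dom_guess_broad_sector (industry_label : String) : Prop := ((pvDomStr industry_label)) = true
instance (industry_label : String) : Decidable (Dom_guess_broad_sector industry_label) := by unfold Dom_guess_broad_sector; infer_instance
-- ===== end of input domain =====

-- B splits the lowercased label into tokens once and classifies by dict lookups on tokens and
-- adjacent token pairs, keeping the hit of minimal rule index, instead of A's 12-branch if-chain
-- of per-keyword padded-substring tests (objective: faster; measured).

-- ===== PORT A =====
-- 'has(*ws)': any((" "+w.lower()+" ") in t for w in ws)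
def gbsHas (t : List Char) (ws : List String) : Bool :=
  ws.any (fun w => PySem.Chars.isIn (' ' :: (PySem.Chars.lower w.toList ++ [' '])) t)

def guess_broad_sector (industry_label : String) : Option (List String) :=
  let t : List Char := ' ' :: (PySem.Chars.lower industry_label.toList ++ [' '])
  if gbsHas t ["telecom"] then some ["communication services"]
  else if gbsHas t ["advertis", "media", "broadcast", "publishing"] then some ["communication services"]
  else if gbsHas t ["software", "semiconductor", "computer", "internet", "communication equipment", "peripherals"] then some ["information technology"]
  else if gbsHas t ["pharma", "drug", "biotech", "medical", "health"] then some ["health care"]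
  else if gbsHas t ["retail", "hotel", "leisure", "auto", "restaurant", "entertainment", "homebuilding", "apparel", "recreation", "distributor"] then some ["consumer discretionary"]
  else if gbsHas t ["beverage", "food", "grocery", "household", "tobacco", "staple"] then some ["consumer staples"]
  else if gbsHas t ["bank", "insurance", "capital markets", "broker"] then some ["financials"]
  else if gbsHas t ["reit", "real estate"] then some ["real estate"]
  else if gbsHas t ["oil", "gas", "energy", "coal"] then some ["energy"]
  else if gbsHas t ["chem", "steel", "metal", "mining", "paper", "packag", "building material", "construction materials"] then some ["materials"]
  else if gbsHas t ["aerospace", "defense", "industrial", "transport", "airline", "railroad", "trucking", "marine", "ship"] then some ["industrials"]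
  else if gbsHas t ["utility", "electric", "water"] then some ["utilities"]
  else none

-- ===== PORT B =====
-- _RULES: each keyword pre-split into its space-separated tokens, with its broad sector
def gbsRules : List (List String × String) :=
  [(["telecom"], "communication services"),
   (["advertis"], "communication services"),
   (["media"], "communication services"),
   (["broadcast"], "communication services"),
   (["publishing"], "communication services"),
   (["software"], "information technology"),
   (["semiconductor"], "information technology"),
   (["computer"], "information technology"),
   (["internet"], "information technology"),
   (["communication", "equipment"], "information technology"),
   (["peripherals"], "information technology"),
   (["pharma"], "health care"),
   (["drug"], "health care"),
   (["biotech"], "health care"),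
   (["medical"], "health care"),
   (["health"], "health care"),
   (["retail"], "consumer discretionary"),
   (["hotel"], "consumer discretionary"),
   (["leisure"], "consumer discretionary"),
   (["auto"], "consumer discretionary"),
   (["restaurant"], "consumer discretionary"),
   (["entertainment"], "consumer discretionary"),
   (["homebuilding"], "consumer discretionary"),
   (["apparel"], "consumer discretionary"),
   (["recreation"], "consumer discretionary"),
   (["distributor"], "consumer discretionary"),
   (["beverage"], "consumer staples"),
   (["food"], "consumer staples"),
   (["grocery"], "consumer staples"),
   (["household"], "consumer staples"),
   (["tobacco"], "consumer staples"),
   (["staple"], "consumer staples"),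
   (["bank"], "financials"),
   (["insurance"], "financials"),
   (["capital", "markets"], "financials"),
   (["broker"], "financials"),
   (["reit"], "real estate"),
   (["real", "estate"], "real estate"),
   (["oil"], "energy"),
   (["gas"], "energy"),
   (["energy"], "energy"),
   (["coal"], "energy"),
   (["chem"], "materials"),
   (["steel"], "materials"),
   (["metal"], "materials"),
   (["mining"], "materials"),
   (["paper"], "materials"),
   (["packag"], "materials"),
   (["building", "material"], "materials"),
   (["construction", "materials"], "materials"),
   (["aerospace"], "industrials"),
   (["defense"], "industrials"),
   (["industrial"], "industrials"),
   (["transport"], "industrials"),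
   (["airline"], "industrials"),
   (["railroad"], "industrials"),
   (["trucking"], "industrials"),
   (["marine"], "industrials"),
   (["ship"], "industrials"),
   (["utility"], "utilities"),
   (["electric"], "utilities"),
   (["water"], "utilities")]
-- the module-level loop building _WORD1 (single-token keys) and _WORD2 (token-pair keys);
-- dicts become association lists (all keys here are fresh, so dict insert appends)
def gbsDicts : List (List Char × (Int × String)) × List ((List Char × List Char) × (Int × String)) :=
  (PySem.List.enumerate gbsRules).foldl (fun ds p =>
    match p.2.1 with
    | [a] => (ds.1 ++ [(a.toList, (p.1, p.2.2))], ds.2)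
    | [a, b] => (ds.1, ds.2 ++ [((a.toList, b.toList), (p.1, p.2.2))])
    | _ => ds) ([], [])

-- 'if hit is not None and (best is None or hit[0] < best[0]): best = hit'
def gbsUpd (best hit : Option (Int × String)) : Option (Int × String) :=
  match hit with
  | none => best
  | some p => match best with
    | none => some p
    | some q => if p.1 < q.1 then some p else some q

def guess_broad_sector_alt (industry_label : String) : Option (List String) :=
  -- List.splitOn ' ' is exact for Python's .split(' ') (one-char separator)
  let toks := (PySem.Chars.lower industry_label.toList).splitOn ' '
  let best := toks.foldl (fun b tok => gbsUpd b (gbsDicts.1.lookup tok)) none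
  let best := (toks.zip (PySem.List.slice toks (some 1) none)).foldl
    (fun b q => gbsUpd b (gbsDicts.2.lookup q)) best
  match best with
  | none => none
  | some p => some [p.2]

-- ===== PRECONDITION & SPEC =====
def Spec_guess_broad_sector (industry_label : String) (out : Option (List String)) : Prop := out = guess_broad_sector_alt industry_label
instance (industry_label : String) (out : Option (List String)) : Decidable (Spec_guess_broad_sector industry_label out) := by unfold Spec_guess_broad_sector; infer_instance

-- ===== CLAIM (what is proved, stated in full; the proofs are below) =====
def Claim_equal_guess_broad_sector : Prop := ∀ (industry_label : String), Dom_guess_broad_sector industry_label → Spec_guess_broad_sector industry_label (guess_broad_sector industry_label)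

-- ===== LEMMAS AND PROOFS =====

-- ---- tokens of a keyword / of the label ----
def gbsTok (w : String) : List (List Char) := (PySem.Chars.lower w.toList).splitOn ' '

-- reference scan: first rule (by index) whose token list occurs contiguously in toks
def eScan (toks : List (List Char)) : List (Int × (List (List Char) × String)) → Option (Int × String)
  | [] => none
  | e :: rest => if e.2.1 <:+: toks then some (e.1, e.2.2) else eScan toks rest

def eGroup (i : Int) (ws : List String) (sec : String) : List (Int × (List (List Char) × String)) :=
  (PySem.List.enumerate ws i).map (fun p => (p.1, (gbsTok p.2, sec)))

def eflat : List (Int × (List (List Char) × String)) :=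
  eGroup 0 ["telecom"] "communication services" ++
  eGroup 1 ["advertis", "media", "broadcast", "publishing"] "communication services" ++
  eGroup 5 ["software", "semiconductor", "computer", "internet", "communication equipment", "peripherals"] "information technology" ++
  eGroup 11 ["pharma", "drug", "biotech", "medical", "health"] "health care" ++
  eGroup 16 ["retail", "hotel", "leisure", "auto", "restaurant", "entertainment", "homebuilding", "apparel", "recreation", "distributor"] "consumer discretionary" ++
  eGroup 26 ["beverage", "food", "grocery", "household", "tobacco", "staple"] "consumer staples" ++
  eGroup 32 ["bank", "insurance", "capital markets", "broker"] "financials" ++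
  eGroup 36 ["reit", "real estate"] "real estate" ++
  eGroup 38 ["oil", "gas", "energy", "coal"] "energy" ++
  eGroup 42 ["chem", "steel", "metal", "mining", "paper", "packag", "building material", "construction materials"] "materials" ++
  eGroup 50 ["aerospace", "defense", "industrial", "transport", "airline", "railroad", "trucking", "marine", "ship"] "industrials" ++
  eGroup 59 ["utility", "electric", "water"] "utilities" ++ []

-- splitOn facts
theorem pv_splitOnP_nosp (p : Char → Bool) : ∀ (l : List Char), ∀ t ∈ l.splitOnP p, ∀ c ∈ t, ¬ p c := by
  intro l
  induction l with
  | nil => simp [List.splitOnP_nil]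
  | cons x xs ih =>
      intro t ht c hc
      rw [List.splitOnP_cons] at ht
      by_cases hx : p x
      · simp [hx] at ht
        rcases ht with rfl | ht
        · simp at hc
        · exact ih t ht c hc
      · simp [hx] at ht
        cases hxs : xs.splitOnP p with
        | nil => rw [hxs] at ht; simp at ht
        | cons h rest =>
            rw [hxs] at ht
            simp [List.modifyHead] at ht
            rcases ht with rfl | ht
            · rcases List.mem_cons.mp hc with rfl | hc
              · simpa using hx
              · exact ih h (by rw [hxs]; exact List.mem_cons_self ..) c hc
            · exact ih t (by rw [hxs]; exact List.mem_cons_of_mem _ ht) c hc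

theorem pv_splitOn_nosp (l : List Char) : ∀ t ∈ l.splitOn ' ', ' ' ∉ t := by
  intro t ht hsp
  exact pv_splitOnP_nosp (· == ' ') l t ht ' ' hsp (by simp)

theorem pv_splitOn_ne_nil (l : List Char) : l.splitOn ' ' ≠ [] := by
  exact List.splitOnP_ne_nil _ l

-- intercalate
theorem pv_interc (l : List Char) : [' '].intercalate (l.splitOn ' ') = l :=
  List.intercalate_splitOn l ' '

-- prefix token alignment
theorem pv_prefix_token : ∀ (w t y z : List Char), ' ' ∉ w → ' ' ∉ t →
    (w ++ ' ' :: y) <+: (t ++ ' ' :: z) → w = t ∧ y <+: z := by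
  intro w
  induction w with
  | nil =>
      intro t y z _ ht h
      cases t with
      | nil => simpa using h
      | cons c t' =>
          simp only [List.nil_append, List.cons_append, List.cons_prefix_cons] at h
          exact absurd (by rw [h.1]; exact List.mem_cons_self .. : ' ' ∈ c :: t') ht
  | cons a w' ih =>
      intro t y z hw ht h
      cases t with
      | nil =>
          simp only [List.cons_append, List.nil_append, List.cons_prefix_cons] at h
          exact absurd (by rw [← h.1]; exact List.mem_cons_self .. : ' ' ∈ a :: w') hw
      | cons c t' =>
          simp only [List.cons_append, List.cons_prefix_cons] at h
          obtain ⟨rfl, h2⟩ := h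
          obtain ⟨rfl, h3⟩ := ih t' y z (fun hh => hw (List.mem_cons_of_mem _ hh)) (fun hh => ht (List.mem_cons_of_mem _ hh)) h2
          exact ⟨rfl, h3⟩

-- peel a space-free block
theorem pv_peel : ∀ (t X p : List Char), ' ' ∉ t → ((' ' :: p) <:+: (t ++ X)) → (' ' :: p) <:+: X := by
  intro t
  induction t with
  | nil => intro X p _ h; simpa using h
  | cons c t' ih =>
      intro X p ht h
      rcases List.infix_cons_iff.mp h with hpre | hinf
      · rw [List.cons_prefix_cons] at hpre
        exact absurd (by rw [hpre.1]; exact List.mem_cons_self .. : ' ' ∈ c :: t') ht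
      · exact ih X p (fun hh => ht (List.mem_cons_of_mem _ hh)) hinf

theorem pv_interc_singleton (x : List Char) : [' '].intercalate [x] = x := by
  simp [List.intercalate]

theorem pv_interc_cons (x y : List Char) (ys : List (List Char)) :
    [' '].intercalate (x :: y :: ys) = x ++ ' ' :: [' '].intercalate (y :: ys) := by
  simp [List.intercalate, List.intersperse]

theorem pv_prefix_interc : ∀ (W T : List (List Char)), W ≠ [] → T ≠ [] →
    (∀ w ∈ W, ' ' ∉ w) → (∀ t ∈ T, ' ' ∉ t) →
    ((([' '].intercalate W) ++ [' ']) <+: (([' '].intercalate T) ++ [' ']) ↔ W <+: T) := by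
  intro W
  induction W with
  | nil => intro T h; exact absurd rfl h
  | cons w1 W' ih =>
      intro T _ hT hWs hTs
      cases T with
      | nil => exact absurd rfl hT
      | cons t T' =>
          have hw1 : ' ' ∉ w1 := hWs w1 (List.mem_cons_self ..)
          have ht : ' ' ∉ t := hTs t (List.mem_cons_self ..)
          cases W' with
          | nil =>
              rw [pv_interc_singleton]
              cases T' with
              | nil =>
                  rw [pv_interc_singleton]
                  constructor
                  · intro h
                    obtain ⟨rfl, -⟩ := pv_prefix_token w1 t [] [] hw1 ht (by simpa using h)
                    exact List.prefix_refl _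
                  · intro h
                    obtain ⟨rfl, -⟩ := List.cons_prefix_cons.mp h
                    exact List.prefix_refl _
              | cons t2 T'' =>
                  rw [pv_interc_cons]
                  constructor
                  · intro h
                    obtain ⟨rfl, -⟩ := pv_prefix_token w1 t [] ([' '].intercalate (t2 :: T'') ++ [' ']) hw1 ht
                      (by simpa using h)
                    exact List.cons_prefix_cons.mpr ⟨rfl, List.nil_prefix⟩
                  · intro h
                    obtain ⟨rfl, -⟩ := List.cons_prefix_cons.mp h
                    rw [List.append_assoc]
                    exact (List.prefix_append_right_inj w1).mpr (by simp)
          | cons w2 W'' =>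
              rw [pv_interc_cons]
              cases T' with
              | nil =>
                  rw [pv_interc_singleton]
                  constructor
                  · intro h
                    rw [List.append_assoc] at h
                    obtain ⟨rfl, h2⟩ := pv_prefix_token w1 t ([' '].intercalate (w2 :: W'') ++ [' ']) [] hw1 ht
                      (by simpa using h)
                    simp at h2
                  · intro h
                    obtain ⟨-, h2⟩ := List.cons_prefix_cons.mp h
                    simp at h2
              | cons t2 T'' =>
                  rw [pv_interc_cons]
                  constructor
                  · intro h
                    rw [List.append_assoc, List.append_assoc] at h
                    obtain ⟨rfl, h2⟩ := pv_prefix_token w1 t _ _ hw1 ht h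
                    have := (ih (t2 :: T'') (by simp) (by simp)
                      (fun x hx => hWs x (List.mem_cons_of_mem _ hx))
                      (fun x hx => hTs x (List.mem_cons_of_mem _ hx))).mp h2
                    exact List.cons_prefix_cons.mpr ⟨rfl, this⟩
                  · intro h
                    obtain ⟨rfl, h2⟩ := List.cons_prefix_cons.mp h
                    rw [List.append_assoc, List.append_assoc]
                    refine (List.prefix_append_right_inj w1).mpr (List.cons_prefix_cons.mpr ⟨rfl, ?_⟩)
                    exact (ih (t2 :: T'') (by simp) (by simp)
                      (fun x hx => hWs x (List.mem_cons_of_mem _ hx))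
                      (fun x hx => hTs x (List.mem_cons_of_mem _ hx))).mpr h2

theorem pv_pad_infix_mpr : ∀ (U W V : List (List Char)), W ≠ [] →
    (∀ t ∈ U ++ W ++ V, ' ' ∉ t) →
    (' ' :: (([' '].intercalate W) ++ [' '])) <:+: (' ' :: (([' '].intercalate (U ++ W ++ V)) ++ [' '])) := by
  intro U
  induction U with
  | nil =>
      intro W V hW hs
      apply List.IsPrefix.isInfix
      rw [List.cons_prefix_cons]
      refine ⟨rfl, ?_⟩
      refine (pv_prefix_interc W ([] ++ W ++ V) hW (by simp [hW]) ?_ hs).mpr (by simp)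
      intro x hx; exact hs x (by simp [hx])
  | cons u U' ih =>
      intro W V hW hs
      have hrest : U' ++ W ++ V ≠ [] := by simp [hW]
      have step : [' '].intercalate ((u :: U') ++ W ++ V)
          = u ++ ' ' :: [' '].intercalate (U' ++ W ++ V) := by
        rcases hrest' : U' ++ W ++ V with - | ⟨y, ys⟩
        · exact absurd hrest' hrest
        · rw [show (u :: U') ++ W ++ V = u :: (U' ++ W ++ V) by simp, hrest', pv_interc_cons]
      rw [step]
      have h1 := ih W V hW (fun x hx => hs x (by simp at hx ⊢; tauto))
      refine h1.trans ?_
      have : ' ' :: (u ++ ' ' :: [' '].intercalate (U' ++ W ++ V) ++ [' '])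
          = (' ' :: u) ++ (' ' :: ([' '].intercalate (U' ++ W ++ V) ++ [' '])) := by simp
      rw [this]
      exact (List.suffix_append _ _).isInfix

theorem pv_pad_infix : ∀ (T W : List (List Char)), W ≠ [] → T ≠ [] →
    (∀ w ∈ W, ' ' ∉ w) → (∀ t ∈ T, ' ' ∉ t) →
    ((' ' :: (([' '].intercalate W) ++ [' '])) <:+: (' ' :: (([' '].intercalate T) ++ [' '])) ↔ W <:+: T) := by
  intro T
  induction T with
  | nil => intro W _ hT; exact absurd rfl hT
  | cons t T' ih =>
      intro W hW _ hWs hTs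
      constructor
      · intro h
        rcases List.infix_cons_iff.mp h with hpre | hinf
        · rw [List.cons_prefix_cons] at hpre
          exact ((pv_prefix_interc W (t :: T') hW (by simp) hWs hTs).mp hpre.2).isInfix
        · cases T' with
          | nil =>
              rw [pv_interc_singleton] at hinf
              have h2 := pv_peel t [' '] _ (hTs t (List.mem_cons_self ..)) hinf
              have := h2.length_le
              simp at this
          | cons t2 T'' =>
              rw [pv_interc_cons] at hinf
              rw [show t ++ ' ' :: [' '].intercalate (t2 :: T'') ++ [' ']
                  = t ++ (' ' :: ([' '].intercalate (t2 :: T'') ++ [' '])) by simp] at hinf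
              have h2 := pv_peel t _ _ (hTs t (List.mem_cons_self ..)) hinf
              have h3 := (ih W hW (by simp) hWs (fun x hx => hTs x (List.mem_cons_of_mem _ hx))).mp h2
              exact List.infix_cons_iff.mpr (Or.inr h3)
      · intro h
        obtain ⟨U, V, hT⟩ := h
        rw [← hT]
        exact pv_pad_infix_mpr U W V hW (by rw [hT]; exact hTs)

theorem pv_isIn_pad (w s : List Char) :
    PySem.Chars.isIn (' ' :: (w ++ [' '])) (' ' :: (s ++ [' '])) = decide (w.splitOn ' ' <:+: s.splitOn ' ') := by
  have h : (' ' :: (w ++ [' '])) <:+: (' ' :: (s ++ [' '])) ↔ w.splitOn ' ' <:+: s.splitOn ' ' := by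
    conv_lhs => rw [← pv_interc w, ← pv_interc s]
    exact pv_pad_infix _ _ (pv_splitOn_ne_nil w) (pv_splitOn_ne_nil s)
      (pv_splitOn_nosp w) (pv_splitOn_nosp s)
  by_cases hc : w.splitOn ' ' <:+: s.splitOn ' '
  · simp [hc, PySem.Chars.isIn_iff_infix, h]
  · rw [(PySem.Chars.isIn_eq_false_iff _ _).mpr (fun hh => hc (h.mp hh))]
    simp [hc]

theorem pv_pair_infix {α : Type} (a b : α) (l : List α) : [a, b] <:+: l ↔ (a, b) ∈ l.zip l.tail := by
  induction l with
  | nil => simp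
  | cons c l' ih =>
      rw [List.infix_cons_iff]
      cases l' with
      | nil => simp [List.prefix_iff_eq_take]  -- [a,b] <+: [c] is false; tail zip empty
      | cons d l'' =>
          constructor
          · rintro (hpre | hinf)
            · rw [List.cons_prefix_cons] at hpre
              obtain ⟨rfl, h2⟩ := hpre
              rw [List.cons_prefix_cons] at h2
              obtain ⟨rfl, -⟩ := h2
              simp [List.zip]
            · simp only [List.tail_cons] at ih ⊢
              exact List.mem_cons_of_mem _ (ih.mp hinf)
          · intro hm
            simp only [List.tail_cons] at hm ⊢
            rcases List.mem_cons.mp hm with heq | hm'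
            · obtain ⟨rfl, rfl⟩ := Prod.mk.injEq .. ▸ heq
              exact Or.inl (List.cons_prefix_cons.mpr ⟨rfl, List.cons_prefix_cons.mpr ⟨rfl, List.nil_prefix⟩⟩)
            · exact Or.inr (ih.mpr hm')

theorem pv_lookup_iff {κ ν : Type} [BEq κ] [LawfulBEq κ] (l : List (κ × ν))
    (h : (l.map Prod.fst).Nodup) (k : κ) (v : ν) : l.lookup k = some v ↔ (k, v) ∈ l := by
  induction l with
  | nil => simp [List.lookup]
  | cons x l' ih =>
      simp only [List.map_cons, List.nodup_cons] at h
      rw [List.lookup]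
      by_cases hk : (k == x.1) = true
      · have hkx : k = x.1 := eq_of_beq hk
        rw [hk]
        simp only [Option.some_inj]
        constructor
        · rintro rfl
          exact List.mem_cons.mpr (Or.inl (by rw [hkx]))
        · intro hm
          rcases List.mem_cons.mp hm with heq | hm'
          · exact (congrArg Prod.snd heq.symm)
          · exact absurd (by simpa [← hkx] using List.mem_map_of_mem (f := Prod.fst) hm'
              : x.1 ∈ l'.map Prod.fst) h.1
      · rw [Bool.not_eq_true] at hk
        rw [hk, ih h.2]
        constructor
        · exact fun hm => List.mem_cons_of_mem _ hm
        · intro hm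
          rcases List.mem_cons.mp hm with heq | hm'
          · exact absurd (congrArg Prod.fst heq) (fun hh => (by simp at hk; exact hk hh : False))
          · exact hm'

theorem pv_fold_spec : ∀ (hl : List (Option (Int × String))) (init : Option (Int × String)),
    (hl.foldl gbsUpd init = none ↔ (init = none ∧ ∀ x ∈ hl, x = none)) ∧
    (∀ p, hl.foldl gbsUpd init = some p →
      ((init = some p ∨ some p ∈ hl) ∧ (∀ q, some q ∈ hl → p.1 ≤ q.1) ∧ (∀ q, init = some q → p.1 ≤ q.1))) := by
  intro hl
  induction hl with
  | nil =>
      intro init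
      refine ⟨by simp, ?_⟩
      intro p hp
      simp only [List.foldl_nil] at hp
      refine ⟨Or.inl hp, by simp, fun q hq => ?_⟩
      rw [hp] at hq
      cases Option.some_inj.mp hq
      exact le_refl _
  | cons x hl' ih =>
      intro init
      rw [List.foldl_cons]
      obtain ⟨ih1, ih2⟩ := ih (gbsUpd init x)
      constructor
      · rw [ih1]
        constructor
        · rintro ⟨h1, h2⟩
          match x, init with
          | none, none => exact ⟨rfl, by simpa using h2⟩
          | none, some q => simp [gbsUpd] at h1
          | some p, none => simp [gbsUpd] at h1
          | some p, some q => simp only [gbsUpd] at h1; split at h1 <;> simp at h1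
        · rintro ⟨rfl, h2⟩
          have hx : x = none := h2 x (List.mem_cons_self ..)
          subst hx
          exact ⟨rfl, fun y hy => h2 y (List.mem_cons_of_mem _ hy)⟩
      · intro p hp
        obtain ⟨hmem, hmin, hinit⟩ := ih2 p hp
        refine ⟨?_, ?_, ?_⟩
        · rcases hmem with hup | hm
          · -- gbsUpd init x = some p: p is init or x
            match x, init, hup with
            | none, init, hup => exact Or.inl hup
            | some r, none, hup => exact Or.inr (List.mem_cons.mpr (Or.inl (by simpa [gbsUpd] using hup.symm)))
            | some r, some q, hup =>
                simp only [gbsUpd] at hup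
                split at hup
                · exact Or.inr (List.mem_cons.mpr (Or.inl hup.symm))
                · exact Or.inl hup
          · exact Or.inr (List.mem_cons_of_mem _ hm)
        · intro q hq
          rcases List.mem_cons.mp hq with heq | hq'
          · -- q is x itself: p ≤ x's index
            subst heq
            match init with
            | none => exact hinit q (by simp [gbsUpd])
            | some r =>
                simp only [gbsUpd] at hinit
                by_cases hlt : q.1 < r.1
                · exact hinit q (by rw [if_pos hlt])
                · have := hinit r (by rw [if_neg hlt])
                  omega
          · exact hmin q hq'
        · intro q hq
          subst hq
          match x with
          | none => exact hinit q rfl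
          | some r =>
              simp only [gbsUpd] at hinit
              by_cases hlt : r.1 < q.1
              · have := hinit r (by rw [if_pos hlt])
                omega
              · exact hinit q (by rw [if_neg hlt])

theorem pv_eScan_none (toks : List (List Char)) (l : List (Int × (List (List Char) × String))) :
    eScan toks l = none ↔ ∀ e ∈ l, ¬ (e.2.1 <:+: toks) := by
  induction l with
  | nil => simp [eScan]
  | cons e rest ih =>
      rw [eScan]
      by_cases h : e.2.1 <:+: toks
      · simp [h]
      · simp [h, ih]

theorem pv_eScan_some (toks : List (List Char)) (l : List (Int × (List (List Char) × String)))
    (hs : l.Pairwise (fun a b => a.1 < b.1)) (p : Int × String) :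
    eScan toks l = some p → ∃ e ∈ l, p = (e.1, e.2.2) ∧ e.2.1 <:+: toks ∧
      ∀ e' ∈ l, e'.2.1 <:+: toks → p.1 ≤ e'.1 := by
  induction l with
  | nil => simp [eScan]
  | cons e rest ih =>
      rw [List.pairwise_cons] at hs
      rw [eScan]
      by_cases h : e.2.1 <:+: toks
      · rw [if_pos h]
        intro hp
        cases Option.some_inj.mp hp
        refine ⟨e, List.mem_cons_self .., rfl, h, ?_⟩
        intro e' he' _
        rcases List.mem_cons.mp he' with rfl | he''
        · exact le_refl _
        · exact le_of_lt (hs.1 e' he'')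
      · rw [if_neg h]
        intro hp
        obtain ⟨e', he', hpe, hinf, hmin⟩ := ih hs.2 hp
        refine ⟨e', List.mem_cons_of_mem _ he', hpe, hinf, ?_⟩
        intro e'' he'' hinf''
        rcases List.mem_cons.mp he'' with rfl | he''
        · exact absurd hinf'' h
        · exact hmin e'' he'' hinf''

theorem pv_eScan_group (toks : List (List Char)) (i : Int) (ws : List String) (sec : String)
    (rest : List (Int × (List (List Char) × String))) :
    ((eScan toks (eGroup i ws sec ++ rest)).map (fun p => [p.2]))
      = if ws.any (fun w => decide (gbsTok w <:+: toks)) then some [sec]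
        else (eScan toks rest).map (fun p => [p.2]) := by
  induction ws generalizing i with
  | nil => simp [eGroup, PySem.List.enumerate_nil]
  | cons w ws' ih =>
      rw [show eGroup i (w :: ws') sec = (i, (gbsTok w, sec)) :: eGroup (i + 1) ws' sec by
        simp [eGroup, PySem.List.enumerate_cons]]
      rw [List.cons_append, eScan, List.any_cons]
      by_cases h : gbsTok w <:+: toks
      · simp [h]
      · simp only [h, decide_false, Bool.false_or]
        exact ih (i + 1)

-- ---- literal facts about the dictionaries and the rule table (kernel-checked) ----
theorem pv_w1_nodup : (gbsDicts.1.map Prod.fst).Nodup := by decide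
theorem pv_w2_nodup : (gbsDicts.2.map Prod.fst).Nodup := by decide
set_option maxRecDepth 8192 in
theorem pv_w1_mem : ∀ kp ∈ gbsDicts.1, ∃ e ∈ eflat, e.2.1 = [kp.1] ∧ e.1 = kp.2.1 ∧ e.2.2 = kp.2.2 := by decide
set_option maxRecDepth 8192 in
theorem pv_w2_mem : ∀ kp ∈ gbsDicts.2, ∃ e ∈ eflat, e.2.1 = [kp.1.1, kp.1.2] ∧ e.1 = kp.2.1 ∧ e.2.2 = kp.2.2 := by decide
set_option maxRecDepth 65536 in
theorem pv_e_arity : ∀ e ∈ eflat,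
    (e.2.1.length = 1 ∧ (e.2.1.headD [], (e.1, e.2.2)) ∈ gbsDicts.1) ∨
    (e.2.1.length = 2 ∧ ((e.2.1.headD [], e.2.1.tail.headD []), (e.1, e.2.2)) ∈ gbsDicts.2) := by decide
set_option maxRecDepth 65536 in
theorem pv_eflat_sorted : eflat.Pairwise (fun a b => a.1 < b.1) := by decide
set_option maxRecDepth 65536 in
theorem pv_eflat_inj : ∀ e ∈ eflat, ∀ e' ∈ eflat, e.1 = e'.1 → e = e' := by decide

-- ---- A equals the reference scan ----
theorem pv_A_eq (s : String) :
    guess_broad_sector s =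
      (eScan ((PySem.Chars.lower s.toList).splitOn ' ') eflat).map (fun p => [p.2]) := by
  rw [eflat]
  simp only [guess_broad_sector, gbsHas, pv_isIn_pad, List.append_assoc, pv_eScan_group, gbsTok]
  rfl

-- ---- B equals the reference scan ----
theorem pv_hit_iff (toks : List (List Char)) (p : Int × String) :
    (some p ∈ toks.map (fun k => gbsDicts.1.lookup k) ++
        (toks.zip toks.tail).map (fun q => gbsDicts.2.lookup q)) ↔
      ∃ e ∈ eflat, p = (e.1, e.2.2) ∧ e.2.1 <:+: toks := by
  rw [List.mem_append, List.mem_map, List.mem_map]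
  constructor
  · rintro (⟨k, hk, hlk⟩ | ⟨q, hq, hlq⟩)
    · obtain ⟨e, he, hkey, hi, hsec⟩ := pv_w1_mem _ ((pv_lookup_iff _ pv_w1_nodup _ _).mp hlk)
      refine ⟨e, he, by rw [hi, hsec], ?_⟩
      rw [hkey]
      exact (List.singleton_infix_iff k toks).mpr hk
    · obtain ⟨e, he, hkey, hi, hsec⟩ := pv_w2_mem _ ((pv_lookup_iff _ pv_w2_nodup _ _).mp hlq)
      refine ⟨e, he, by rw [hi, hsec], ?_⟩
      rw [hkey]
      exact (pv_pair_infix q.1 q.2 toks).mpr hq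
  · rintro ⟨e, he, rfl, hinf⟩
    rcases pv_e_arity e he with ⟨hlen, hmem⟩ | ⟨hlen, hmem⟩
    · obtain ⟨a, ha⟩ : ∃ a, e.2.1 = [a] := by
        cases h : e.2.1 with
        | nil => rw [h] at hlen; simp at hlen
        | cons a t => rw [h] at hlen; simp at hlen; exact ⟨a, by rw [hlen]⟩
      rw [ha] at hinf
      refine Or.inl ⟨a, (List.singleton_infix_iff a toks).mp hinf, ?_⟩
      rw [(pv_lookup_iff _ pv_w1_nodup _ _).mpr (by rw [show e.2.1.headD [] = a by rw [ha]; rfl] at hmem; exact hmem)]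
    · obtain ⟨a, b, hab⟩ : ∃ a b, e.2.1 = [a, b] := by
        cases h : e.2.1 with
        | nil => rw [h] at hlen; simp at hlen
        | cons a t =>
            cases t with
            | nil => rw [h] at hlen; simp at hlen
            | cons b t2 =>
                rw [h] at hlen; simp at hlen
                exact ⟨a, b, by rw [hlen]⟩
      rw [hab] at hinf
      refine Or.inr ⟨(a, b), (pv_pair_infix a b toks).mp hinf, ?_⟩
      rw [(pv_lookup_iff _ pv_w2_nodup _ _).mpr (by
        rw [show e.2.1.headD [] = a by rw [hab]; rfl, show e.2.1.tail.headD [] = b by rw [hab]; rfl] at hmem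
        exact hmem)]

theorem pv_B_eq (s : String) :
    guess_broad_sector_alt s =
      (eScan ((PySem.Chars.lower s.toList).splitOn ' ') eflat).map (fun p => [p.2]) := by
  unfold guess_broad_sector_alt
  dsimp only
  rw [show PySem.List.slice ((PySem.Chars.lower s.toList).splitOn ' ') (some 1) none
      = ((PySem.Chars.lower s.toList).splitOn ' ').tail by simp [pysem]]
  rw [← List.foldl_map (f := fun k => gbsDicts.1.lookup k) (g := gbsUpd),
      ← List.foldl_map (f := fun q => gbsDicts.2.lookup q) (g := gbsUpd),
      ← List.foldl_append]
  set toks := (PySem.Chars.lower s.toList).splitOn ' ' with htoks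
  set hits := toks.map (fun k => gbsDicts.1.lookup k) ++
      (toks.zip toks.tail).map (fun q => gbsDicts.2.lookup q) with hhits
  obtain ⟨hnone, hsome⟩ := pv_fold_spec hits none
  cases hr : hits.foldl gbsUpd none with
  | none =>
      have hno := (hnone.mp hr).2
      rw [(pv_eScan_none toks eflat).mpr ?_]
      · rfl
      · intro e he hinf
        have := (pv_hit_iff toks (e.1, e.2.2)).mpr ⟨e, he, rfl, hinf⟩
        exact absurd (hno _ this) (Option.some_ne_none _)
  | some p =>
      obtain ⟨hmem, hmin, -⟩ := hsome p hr
      rcases hmem with h0 | hmem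
      · exact absurd h0.symm (Option.some_ne_none _)
      obtain ⟨ep, hep, hpe, hpinf⟩ := (pv_hit_iff toks p).mp hmem
      cases he : eScan toks eflat with
      | none => exact absurd hpinf ((pv_eScan_none toks eflat).mp he ep hep)
      | some q =>
          obtain ⟨eq', heq', hqe, hqinf, hqmin⟩ := pv_eScan_some toks eflat pv_eflat_sorted q he
          have h1 : p.1 ≤ q.1 := hmin q ((pv_hit_iff toks q).mpr ⟨eq', heq', hqe, hqinf⟩)
          have h2 : q.1 ≤ ep.1 := hqmin ep hep hpinf
          have hee : ep = eq' := pv_eflat_inj ep hep eq' heq'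
            (by rw [hpe] at h1; rw [hqe] at h1 h2; simp at h1 h2; omega)
          rw [hpe, hqe, hee]
          rfl

-- ===== VERDICT (by name: the statement is the Claim_ definition above) =====
theorem guess_broad_sector_spec : Claim_equal_guess_broad_sector := by
  intro s _
  unfold Spec_guess_broad_sector
  rw [pv_A_eq, pv_B_eq]
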